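-- pv_equiv track=rewrite | github.com/asfDRT/crypto_dz1 | crypto_analysis/affine_recurent_dec.py | affine_recursive_decrypt
-- ===== SOURCE A (Python) =====
-- def mod_inverse(a, m):
--     '''
--     Функция для вычисления мультипликативного обратного элемента в кольце Z_m
--     '''
--     for i in range(1, m):
--         if (a * i) % m == 1:
--             return i
--     return None  # Если обратного элемента нет
--
-- def affine_recursive_decrypt(text, a1, a2, b1, b2, alphabet):
--     '''
--     Функция для расшифрования аффинного рекуррентного шифра
--     Возвращает расшифрованный текст и последовательности ключей
--     '''
--     m = len(alphabet)
--     n = len(text)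
--     a_sequence = [a1, a2]
--     b_sequence = [b1, b2]
--
--     # Генерируем последовательности ключей
--     for i in range(2, n):
--         a_next = (a_sequence[i-1] * a_sequence[i-2]) % m
--         a_sequence.append(a_next)
--         b_next = (b_sequence[i-1] + b_sequence[i-2]) % m
--         b_sequence.append(b_next)
--
--     decrypted_text = []
--     for i, char in enumerate(text):
--         if char in alphabet:
--             y = alphabet.index(char)
--             a_i = a_sequence[i]
--             b_i = b_sequence[i]
--             # x_i = a_i^{-1} * (y_i - b_i) mod n
--             a_inv = mod_inverse(a_i, m)
--             if a_inv is None: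
--                 return None, None, None  # Невозможно расшифровать с этими ключами
--             x = (a_inv * (y - b_i)) % m
--             decrypted_text.append(alphabet[x])
--         else:
--             decrypted_text.append(char)
--     return ''.join(decrypted_text), a_sequence, b_sequence
-- ===== SOURCE B (Python) =====
-- def _egcd(a, b):
--     # extended Euclid: for a, b >= 0 returns (g, x, y) with a*x + b*y == g == gcd(a, b)
--     if a == 0:
--         return b, 0, 1
--     g, x, y = _egcd(b % a, a)
--     return g, y - (b // a) * x, x
--
-- def _inverse(a, m):
--     # the unique inverse in 1..m-1 exists iff m > 1 and gcd(a, m) == 1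
--     if m <= 1:
--         return None
--     g, x, _ = _egcd(a % m, m)
--     return x % m if g == 1 else None
--
-- def affine_recursive_decrypt(text, a1, a2, b1, b2, alphabet):
--     m = len(alphabet)
--     # first-occurrence position of each letter (reversed, so earlier entries win)
--     pos = {ch: j for j, ch in reversed(list(enumerate(alphabet)))}
--     a_seq = [a1, a2]
--     b_seq = [b1, b2]
--     f_prev, f_cur = 1, 1  # Fibonacci pair F(i-1), F(i) modulo m
--     out = []
--     for i, ch in enumerate(text):
--         if i >= 2:
--             a_seq.append(a_seq[-1] * a_seq[-2] % m)
--             # closed form: b_i = F(i-1)*b1 + F(i)*b2 (mod m)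
--             b_seq.append((f_prev * b1 + f_cur * b2) % m)
--             f_prev, f_cur = f_cur, (f_prev + f_cur) % m
--         j = pos.get(ch)
--         if j is None:
--             out.append(ch)
--         else:
--             inv = _inverse(a_seq[i], m)
--             if inv is None:
--                 return None, None, None
--             out.append(alphabet[inv * (j - b_seq[i]) % m])
--     return ''.join(out), a_seq, b_seq
-- ===== Notes on version B (the rewrite author's own statement) =====
-- stated objective: alternative
-- what changed: Computes modular inverses by extended Euclid instead of A's trial-division scan over 1..m-1, replaces the b-key recurrence by its Fibonacci closed form b_i = F(i-1)*b1 + F(i)*b2 (mod m) maintained as a reduced Fibonacci pair, replaces the per-character alphabet.index scan by a first-occurrence dict built once, and fuses key generation and decryption into a single pass.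
import Mathlib
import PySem

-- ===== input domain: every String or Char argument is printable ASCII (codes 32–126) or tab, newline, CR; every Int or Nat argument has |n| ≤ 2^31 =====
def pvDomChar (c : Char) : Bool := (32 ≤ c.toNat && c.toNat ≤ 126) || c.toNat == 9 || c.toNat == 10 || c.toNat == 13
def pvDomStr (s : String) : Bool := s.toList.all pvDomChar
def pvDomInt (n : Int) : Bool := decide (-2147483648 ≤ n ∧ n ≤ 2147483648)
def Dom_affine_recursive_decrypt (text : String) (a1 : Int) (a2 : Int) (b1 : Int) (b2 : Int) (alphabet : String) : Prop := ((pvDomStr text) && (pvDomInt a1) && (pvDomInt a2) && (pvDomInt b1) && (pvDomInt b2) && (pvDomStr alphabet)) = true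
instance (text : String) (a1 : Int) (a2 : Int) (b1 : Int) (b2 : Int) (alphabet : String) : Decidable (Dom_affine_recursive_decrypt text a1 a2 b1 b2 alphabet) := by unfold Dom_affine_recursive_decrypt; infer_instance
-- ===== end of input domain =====

-- B replaces A's trial-division inverse search by extended Euclid, the b-key
-- recurrence by its Fibonacci closed form kept as a reduced running pair, the
-- alphabet.index scan by a first-occurrence dict, and fuses key generation and
-- decryption into one pass; A and B agree wherever A does not raise.

-- ===== PORT A =====
def pvModInvLoop (a m : Int) : List Int → Option Int
  | [] => none
  | i :: rest => if PySem.Int.mod (a * i) m = 1 then some i else pvModInvLoop a m rest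

def pvModInverse (a m : Int) : Option Int :=
  pvModInvLoop a m (PySem.List.pyRange 1 m 1)

-- A's key-generation loop `for i in range(2, n)` (k = iterations left; as.length = i,
-- so the indices i-1, i-2 read by the Python are always in range → plain getD)
def pvKeyLoopA (m : Int) : Nat → List Int × List Int → List Int × List Int
  | 0, s => s
  | k + 1, (as, bs) =>
      let i := as.length
      let an := PySem.Int.mod (as.getD (i - 1) 0 * as.getD (i - 2) 0) m
      let bn := PySem.Int.mod (bs.getD (i - 1) 0 + bs.getD (i - 2) 0) m
      pvKeyLoopA m k (as ++ [an], bs ++ [bn])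

-- A's decryption loop `for i, char in enumerate(text)` (i always < n = len of key lists)
def pvDecLoopA (alpha : List Char) (m : Int) (as bs : List Int) :
    List Char → Nat → List Char → Option (List Char)
  | [], _, acc => some acc
  | c :: rest, i, acc =>
      if alpha.contains c then
        -- alphabet.index(char): in range because of the contains-guard
        let y : Int := ((PySem.List.index? alpha c).getD 0 : Nat)
        match pvModInverse (as.getD i 0) m with
        | none => none
        | some inv =>
            pvDecLoopA alpha m as bs rest (i + 1)
              (acc ++ [PySem.List.pyGetD alpha (PySem.Int.mod (inv * (y - bs.getD i 0)) m) ' '])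
      else pvDecLoopA alpha m as bs rest (i + 1) (acc ++ [c])

def affine_recursive_decrypt (text : String) (a1 : Int) (a2 : Int) (b1 : Int) (b2 : Int) (alphabet : String) : Option String × Option (List Int) × Option (List Int) :=
  let m : Int := PySem.Str.len alphabet
  let n := text.toList.length
  let kk := pvKeyLoopA m (n - 2) ([a1, a2], [b1, b2])
  match pvDecLoopA alphabet.toList m kk.1 kk.2 text.toList 0 [] with
  | none => (none, none, none)
  | some cs => (some (String.ofList cs), some kk.1, some kk.2)

-- ===== PORT B =====
-- termination fact for the Euclidean recursion (cited by pvEgcd's decreasing_by)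
theorem pvModAbsLt (b a : Int) (ha : a ≠ 0) : (PySem.Int.mod b a).natAbs < a.natAbs := by
  rcases lt_or_gt_of_ne ha with h | h
  · have h2 := PySem.Int.mod_neg_bounds b h
    omega
  · have h2 := PySem.Int.mod_nonneg b h
    have h3 := PySem.Int.mod_lt b h
    omega

-- extended Euclid `_egcd(a, b)`: returns (g, x, y)
def pvEgcd (a b : Int) : Int × Int × Int :=
  if h : a = 0 then (b, 0, 1)
  else
    let r := pvEgcd (PySem.Int.mod b a) a
    (r.1, r.2.2 - PySem.Int.floordiv b a * r.2.1, r.2.1)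
termination_by a.natAbs
decreasing_by exact pvModAbsLt b a h

-- `_inverse(a, m)`
def pvInverse (a m : Int) : Option Int :=
  if m ≤ 1 then none
  else
    let r := pvEgcd (PySem.Int.mod a m) m
    if r.1 = 1 then some (PySem.Int.mod r.2.1 m) else none

-- `{ch: j for j, ch in reversed(list(enumerate(alphabet)))}`
def pvPosDictB (alpha : List Char) : PySem.Dict Char Int :=
  ((PySem.List.enumerate alpha 0).reverse).foldl (fun d p => d.insert p.2 p.1) PySem.Dict.empty

-- B's fused loop: extend the key sequences at i ≥ 2 (b via the reduced Fibonacci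
-- pair fp, fc), then decrypt the character via the dict and the egcd inverse
def pvDecLoopB (alpha : List Char) (pos : PySem.Dict Char Int) (m b1 b2 : Int) :
    List Char → Nat → List Int → List Int → Int → Int → List Char →
    Option (List Char) × List Int × List Int
  | [], _, as, bs, _, _, acc => (some acc, as, bs)
  | c :: rest, i, as, bs, fp, fc, acc =>
      let as' := if 2 ≤ i then
          as ++ [PySem.Int.mod (PySem.List.pyGetD as (-1) 0 * PySem.List.pyGetD as (-2) 0) m]
        else as
      let bs' := if 2 ≤ i then bs ++ [PySem.Int.mod (fp * b1 + fc * b2) m] else bs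
      let fp' := if 2 ≤ i then fc else fp
      let fc' := if 2 ≤ i then PySem.Int.mod (fp + fc) m else fc
      match pos.get? c with
      | none => pvDecLoopB alpha pos m b1 b2 rest (i + 1) as' bs' fp' fc' (acc ++ [c])
      | some j =>
          match pvInverse (as'.getD i 0) m with
          | none => (none, as', bs')
          | some inv =>
              pvDecLoopB alpha pos m b1 b2 rest (i + 1) as' bs' fp' fc'
                (acc ++ [PySem.List.pyGetD alpha (PySem.Int.mod (inv * (j - bs'.getD i 0)) m) ' '])

def affine_recursive_decrypt_alt (text : String) (a1 : Int) (a2 : Int) (b1 : Int) (b2 : Int) (alphabet : String) : Option String × Option (List Int) × Option (List Int) :=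
  let m : Int := PySem.Str.len alphabet
  let r := pvDecLoopB alphabet.toList (pvPosDictB alphabet.toList) m b1 b2 text.toList 0 [a1, a2] [b1, b2] 1 1 []
  match r.1 with
  | none => (none, none, none)
  | some cs => (some (String.ofList cs), some r.2.1, some r.2.2)

-- ===== PRECONDITION & SPEC =====
-- Pre_ excludes exactly the inputs where A raises ZeroDivisionError: an empty
-- alphabet together with a text of length ≥ 3 reaches `% 0` in the key loop.
def Pre_affine_recursive_decrypt (text : String) (a1 : Int) (a2 : Int) (b1 : Int) (b2 : Int) (alphabet : String) : Prop :=
  ¬ (PySem.Str.len alphabet = 0 ∧ 3 ≤ PySem.Str.len text)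
instance (text : String) (a1 : Int) (a2 : Int) (b1 : Int) (b2 : Int) (alphabet : String) : Decidable (Pre_affine_recursive_decrypt text a1 a2 b1 b2 alphabet) := by unfold Pre_affine_recursive_decrypt; infer_instance

def pvWitness_affine_recursive_decrypt : String × Int × Int × Int × Int × String := ("cab!", 3, 5, 1, 2, "abc")

def Spec_affine_recursive_decrypt (text : String) (a1 : Int) (a2 : Int) (b1 : Int) (b2 : Int) (alphabet : String) (out : Option String × Option (List Int) × Option (List Int)) : Prop := out = affine_recursive_decrypt_alt text a1 a2 b1 b2 alphabet
instance (text : String) (a1 : Int) (a2 : Int) (b1 : Int) (b2 : Int) (alphabet : String) (out : Option String × Option (List Int) × Option (List Int)) : Decidable (Spec_affine_recursive_decrypt text a1 a2 b1 b2 alphabet out) := by unfold Spec_affine_recursive_decrypt; infer_instance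

-- ===== CLAIM (what is proved, stated in full; the proofs are below) =====
def Claim_equal_affine_recursive_decrypt : Prop := ∀ (text : String) (a1 : Int) (a2 : Int) (b1 : Int) (b2 : Int) (alphabet : String), Dom_affine_recursive_decrypt text a1 a2 b1 b2 alphabet → Pre_affine_recursive_decrypt text a1 a2 b1 b2 alphabet → Spec_affine_recursive_decrypt text a1 a2 b1 b2 alphabet (affine_recursive_decrypt text a1 a2 b1 b2 alphabet)

-- ===== LEMMAS AND PROOFS =====

-- the i-th a-key and b-key
def pvK (m a1 a2 : Int) : Nat → Int
  | 0 => a1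
  | 1 => a2
  | i + 2 => PySem.Int.mod (pvK m a1 a2 (i + 1) * pvK m a1 a2 i) m

def pvL (m b1 b2 : Int) : Nat → Int
  | 0 => b1
  | 1 => b2
  | i + 2 => PySem.Int.mod (pvL m b1 b2 (i + 1) + pvL m b1 b2 i) m

def pvKs (m a1 a2 : Int) (j : Nat) : List Int := (List.range j).map (pvK m a1 a2)
def pvLs (m b1 b2 : Int) (j : Nat) : List Int := (List.range j).map (pvL m b1 b2)

theorem pvKs_two (m a1 a2 : Int) : pvKs m a1 a2 2 = [a1, a2] := by
  simp [pvKs, List.range_succ]; exact ⟨rfl, rfl⟩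

theorem pvLs_two (m b1 b2 : Int) : pvLs m b1 b2 2 = [b1, b2] := by
  simp [pvLs, List.range_succ]; exact ⟨rfl, rfl⟩

theorem pvKs_getD (m a1 a2 : Int) {i j : Nat} (h : i < j) :
    (pvKs m a1 a2 j).getD i 0 = pvK m a1 a2 i := by
  simp [pvKs, List.getD, h]

theorem pvLs_getD (m b1 b2 : Int) {i j : Nat} (h : i < j) :
    (pvLs m b1 b2 j).getD i 0 = pvL m b1 b2 i := by
  simp [pvLs, List.getD, h]

theorem pvKs_succ (m a1 a2 : Int) (j : Nat) :
    pvKs m a1 a2 (j + 1) = pvKs m a1 a2 j ++ [pvK m a1 a2 j] := by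
  simp [pvKs, List.range_succ]

theorem pvLs_succ (m b1 b2 : Int) (j : Nat) :
    pvLs m b1 b2 (j + 1) = pvLs m b1 b2 j ++ [pvL m b1 b2 j] := by
  simp [pvLs, List.range_succ]

theorem pvK_step (m a1 a2 : Int) {j : Nat} (h : 2 ≤ j) :
    pvK m a1 a2 j = PySem.Int.mod (pvK m a1 a2 (j - 1) * pvK m a1 a2 (j - 2)) m := by
  obtain ⟨i, rfl⟩ := Nat.exists_eq_add_of_le h
  simp [Nat.add_comm 2 i, pvK]

theorem pvL_step (m b1 b2 : Int) {j : Nat} (h : 2 ≤ j) :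
    pvL m b1 b2 j = PySem.Int.mod (pvL m b1 b2 (j - 1) + pvL m b1 b2 (j - 2)) m := by
  obtain ⟨i, rfl⟩ := Nat.exists_eq_add_of_le h
  simp [Nat.add_comm 2 i, pvL]

-- A's key loop, characterised
theorem pvKeyLoopA_eq (m a1 a2 b1 b2 : Int) :
    ∀ (k j : Nat), 2 ≤ j →
      pvKeyLoopA m k (pvKs m a1 a2 j, pvLs m b1 b2 j) =
        (pvKs m a1 a2 (j + k), pvLs m b1 b2 (j + k)) := by
  intro k
  induction k with
  | zero => intro j _; simp [pvKeyLoopA]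
  | succ k ih =>
      intro j hj
      have hlen : (pvKs m a1 a2 j).length = j := by simp [pvKs]
      have h1 : j - 1 < j := by omega
      have h2 : j - 2 < j := by omega
      rw [pvKeyLoopA]
      simp only [hlen, pvKs_getD m a1 a2 h1, pvKs_getD m a1 a2 h2,
        pvLs_getD m b1 b2 h1, pvLs_getD m b1 b2 h2]
      rw [← pvK_step m a1 a2 hj, ← pvL_step m b1 b2 hj, ← pvKs_succ, ← pvLs_succ,
        ih (j + 1) (by omega)]
      have : j + 1 + k = j + (k + 1) := by omega
      rw [this]

-- the dict built by inserting reversed enumerate pairs is first-occurrence lookup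
theorem pvPosDictB_fold (l : List Char) :
    ∀ (s : Int) (d : PySem.Dict Char Int) (c : Char),
      ((PySem.List.enumerate l s).foldr (fun p d => d.insert p.2 p.1) d).get? c =
        match PySem.List.index? l c with
        | some n => some (s + (n : Int))
        | none => d.get? c := by
  induction l with
  | nil => intro s d c; simp [PySem.List.enumerate_nil, PySem.List.index?]
  | cons x rest ih =>
      intro s d c
      rw [PySem.List.enumerate_cons]
      simp only [List.foldr_cons]
      rw [PySem.Dict.get?_insert]
      by_cases hc : c = x
      · subst hc
        rw [if_pos rfl, PySem.List.index?_cons_self]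
        simp
      · rw [if_neg hc, ih (s + 1) d c,
          PySem.List.index?_cons_of_ne _ (fun h => hc h.symm)]
        cases PySem.List.index? rest c with
        | none => simp
        | some n => simp; omega

theorem pvPosDictB_get? (alpha : List Char) (c : Char) :
    (pvPosDictB alpha).get? c = (PySem.List.index? alpha c).map (fun n => (n : Int)) := by
  rw [pvPosDictB, List.foldl_reverse, pvPosDictB_fold alpha 0 PySem.Dict.empty c]
  cases PySem.List.index? alpha c with
  | none => simp [PySem.Dict.get?_empty]
  | some n => simp

theorem pvKs_stepB (m a1 a2 : Int) (i : Nat) :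
    (if 2 ≤ i then
        pvKs m a1 a2 (max 2 i) ++ [PySem.Int.mod (PySem.List.pyGetD (pvKs m a1 a2 (max 2 i)) (-1) 0 * PySem.List.pyGetD (pvKs m a1 a2 (max 2 i)) (-2) 0) m]
      else pvKs m a1 a2 (max 2 i)) = pvKs m a1 a2 (max 2 (i + 1)) := by
  by_cases h2 : 2 ≤ i
  · have hmx : max 2 i = i := by omega
    have hmx1 : max 2 (i + 1) = i + 1 := by omega
    rw [if_pos h2, hmx, hmx1,
      PySem.List.pyGetD_neg_ofNat _ 1 0 (by omega) (by simp [pvKs]; omega),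
      PySem.List.pyGetD_neg_ofNat _ 2 0 (by omega) (by simp [pvKs]; omega)]
    simp only [pvKs, List.getElem_map, List.getElem_range, List.length_map, List.length_range]
    rw [← pvK_step m a1 a2 h2, List.range_succ, List.map_append]
    rfl
  · have : max 2 i = max 2 (i + 1) := by omega
    rw [if_neg h2, this]

-- Fibonacci closed form of the b-key recurrence
theorem pvL_fib (m b1 b2 : Int) (hm : 0 < m) :
    ∀ k : Nat, pvL m b1 b2 (k + 2) =
      PySem.Int.mod ((Nat.fib (k + 1) : Int) * b1 + (Nat.fib (k + 2) : Int) * b2) m := by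
  intro k
  induction k using Nat.twoStepInduction with
  | zero =>
      show PySem.Int.mod (pvL m b1 b2 1 + pvL m b1 b2 0) m = _
      simp only [pvL]
      norm_num [Nat.fib]
      congr 1; ring
  | one =>
      show PySem.Int.mod (pvL m b1 b2 2 + pvL m b1 b2 1) m = _
      have h2 : pvL m b1 b2 2 = PySem.Int.mod (pvL m b1 b2 1 + pvL m b1 b2 0) m := rfl
      rw [h2]
      simp only [pvL, PySem.Int.mod_eq_emod_of_pos hm]
      rw [Int.emod_add_emod]
      congr 1
      norm_num [Nat.fib]
      ring
  | more k ih1 ih2 =>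
      show PySem.Int.mod (pvL m b1 b2 (k + 3) + pvL m b1 b2 (k + 2)) m = _
      have h3 : (k : Nat) + 3 = (k + 1) + 2 := by omega
      rw [h3, ih2, ih1]
      simp only [PySem.Int.mod_eq_emod_of_pos hm]
      rw [← Int.add_emod]
      congr 1
      have f1 : Nat.fib (k + 3) = Nat.fib (k + 1) + Nat.fib (k + 2) := Nat.fib_add_two
      have f2 : Nat.fib (k + 4) = Nat.fib (k + 2) + Nat.fib (k + 3) := Nat.fib_add_two
      push_cast [f1, f2]
      ring

-- congruence of a two-term combination modulo m
theorem pvModCombCongr (m x y u v b1 b2 : Int) (hx : x % m = u % m) (hy : y % m = v % m) :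
    (x * b1 + y * b2) % m = (u * b1 + v * b2) % m :=
  Int.ModEq.add (Int.ModEq.mul_right b1 hx) (Int.ModEq.mul_right b2 hy)

-- ===== extended Euclid: correctness =====
theorem pvEgcd_spec (a b : Int) (ha : 0 ≤ a) (hb : 0 < b) :
    (pvEgcd a b).1 = (Int.gcd a b : Int) ∧
      a * (pvEgcd a b).2.1 + b * (pvEgcd a b).2.2 = (pvEgcd a b).1 := by
  induction a, b using pvEgcd.induct with
  | case1 b => rw [pvEgcd]; simp [Int.gcd_zero_left, Int.natAbs_of_nonneg (le_of_lt hb)]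
  | case2 a b h ih =>
      have ha' : 0 < a := lt_of_le_of_ne ha (Ne.symm h)
      have hmnn := PySem.Int.mod_nonneg b ha'
      have ih' := ih hmnn ha'
      rw [pvEgcd, dif_neg h]
      simp only []
      constructor
      · rw [ih'.1]
        rw [PySem.Int.mod_eq_emod_of_pos ha']
        rw [Int.gcd_emod, Int.gcd_comm]
      · have hq := PySem.Int.floordiv_mul_add_mod b a
        have hbez := ih'.2
        linear_combination hbez - (pvEgcd (PySem.Int.mod b a) a).2.1 * hq

-- the trial loop returns none when nothing satisfies the condition
theorem pvModInvLoop_none (a m : Int) :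
    ∀ l : List Int, (∀ k ∈ l, PySem.Int.mod (a * k) m ≠ 1) → pvModInvLoop a m l = none := by
  intro l
  induction l with
  | nil => intro _; rfl
  | cons x rest ih =>
      intro h
      rw [pvModInvLoop, if_neg (h x (List.mem_cons_self))]
      exact ih (fun k hk => h k (List.mem_cons_of_mem x hk))

-- the trial loop returns the unique satisfying element
theorem pvModInvLoop_unique (a m j : Int) :
    ∀ l : List Int, j ∈ l → PySem.Int.mod (a * j) m = 1 →
      (∀ k ∈ l, PySem.Int.mod (a * k) m = 1 → k = j) → pvModInvLoop a m l = some j := by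
  intro l
  induction l with
  | nil => intro h; simp at h
  | cons x rest ih =>
      intro hmem hj huniq
      by_cases hx : PySem.Int.mod (a * x) m = 1
      · rw [pvModInvLoop, if_pos hx, huniq x List.mem_cons_self hx]
      · rw [pvModInvLoop, if_neg hx]
        have hjr : j ∈ rest := by
          rcases List.mem_cons.mp hmem with h | h
          · exact absurd (h ▸ hj) hx
          · exact h
        exact ih hjr hj (fun k hk => huniq k (List.mem_cons_of_mem x hk))

-- egcd-based inverse = trial-division inverse
theorem pvInverse_eq (a m : Int) : pvInverse a m = pvModInverse a m := by
  by_cases hm : m ≤ 1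
  · rw [pvInverse, if_pos hm, pvModInverse, PySem.List.pyRange_one_eq_nil hm]
    rfl
  · push_neg at hm
    have hm0 : 0 < m := by omega
    have h1m : (1 : Int) % m = 1 := Int.emod_eq_of_lt (by omega) (by omega)
    rw [pvInverse, if_neg (by omega)]
    have ha0 : 0 ≤ PySem.Int.mod a m := PySem.Int.mod_nonneg a hm0
    obtain ⟨hg, hbez⟩ := pvEgcd_spec (PySem.Int.mod a m) m ha0 hm0
    have hgcd : Int.gcd (PySem.Int.mod a m) m = Int.gcd a m := by
      rw [PySem.Int.mod_eq_emod_of_pos hm0, Int.gcd_emod]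
    simp only []
    by_cases h1 : (pvEgcd (PySem.Int.mod a m) m).1 = 1
    · rw [if_pos h1]
      rw [h1] at hbez
      set x := (pvEgcd (PySem.Int.mod a m) m).2.1 with hxdef
      set j := PySem.Int.mod x m with hjdef
      have hjem : j = x % m := PySem.Int.mod_eq_emod_of_pos hm0
      have hax : a * x % m = 1 := by
        have hstep : a * x ≡ PySem.Int.mod a m * x [ZMOD m] := by
          apply Int.ModEq.mul_right
          rw [PySem.Int.mod_eq_emod_of_pos hm0]
          exact (Int.emod_emod_of_dvd a dvd_rfl).symm
        have h2 : PySem.Int.mod a m * x ≡ 1 [ZMOD m] := by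
          have heq : PySem.Int.mod a m * x = 1 - m * (pvEgcd (PySem.Int.mod a m) m).2.2 := by
            linarith [hbez]
          rw [heq]
          unfold Int.ModEq
          rw [Int.sub_emod, Int.mul_emod_right]
          simp
        have h3 := hstep.trans h2
        unfold Int.ModEq at h3
        rw [h1m] at h3
        exact h3
      have hPj : PySem.Int.mod (a * j) m = 1 := by
        rw [PySem.Int.mod_eq_emod_of_pos hm0, hjem]
        calc a * (x % m) % m = a % m * (x % m % m) % m := by rw [Int.mul_emod]
        _ = a % m * (x % m) % m := by rw [Int.emod_emod_of_dvd _ dvd_rfl]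
        _ = a * x % m := by rw [← Int.mul_emod]
        _ = 1 := hax
      have hjlo : 0 ≤ j := PySem.Int.mod_nonneg x hm0
      have hjhi : j < m := PySem.Int.mod_lt x hm0
      have hjne : j ≠ 0 := by
        intro h0
        rw [h0] at hPj
        simp [PySem.Int.mod_eq_emod_of_pos hm0] at hPj
      rw [pvModInverse]
      rw [pvModInvLoop_unique a m j _ ((PySem.List.mem_pyRange_one).mpr ⟨by omega, hjhi⟩) hPj]
      intro k hk hPk
      obtain ⟨hk1, hk2⟩ := (PySem.List.mem_pyRange_one).mp hk
      have hak : a * k ≡ 1 [ZMOD m] := by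
        unfold Int.ModEq
        rw [← PySem.Int.mod_eq_emod_of_pos hm0, hPk, h1m]
      have hxa : x * a ≡ 1 [ZMOD m] := by
        have hax' : a * x ≡ 1 [ZMOD m] := by
          unfold Int.ModEq
          rw [hax, h1m]
        rwa [mul_comm] at hax'
      have hkx : k ≡ x [ZMOD m] := by
        calc k = x * a * k - (x * a - 1) * k := by ring
        _ ≡ x * a * k - 0 * k [ZMOD m] := by
              apply Int.ModEq.sub_left
              apply Int.ModEq.mul_right
              exact (Int.ModEq.sub_right 1 hxa).trans (by simp)
        _ = x * (a * k) := by ring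
        _ ≡ x * 1 [ZMOD m] := Int.ModEq.mul_left x hak
        _ = x := by ring
      have hxj : x ≡ j [ZMOD m] := by
        unfold Int.ModEq
        rw [hjem, Int.emod_emod_of_dvd _ dvd_rfl]
      have hkj : k % m = j % m := hkx.trans hxj
      rw [Int.emod_eq_of_lt (by omega) hk2, Int.emod_eq_of_lt hjlo hjhi] at hkj
      exact hkj
    · rw [if_neg h1]
      have hgne : Int.gcd a m ≠ 1 := by
        intro hone
        apply h1
        rw [hg, hgcd, hone]
        rfl
      rw [pvModInverse]
      rw [pvModInvLoop_none a m _ ?_]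
      intro k hk hPk
      have hPk' : a * k % m = 1 := by rw [← PySem.Int.mod_eq_emod_of_pos hm0]; exact hPk
      have hzero : (a * k - 1) % m = 0 := by
        rw [Int.sub_emod, hPk', h1m]
        simp
      have hmdvd : m ∣ a * k - 1 := Int.dvd_of_emod_eq_zero hzero
      have h1d : (Int.gcd a m : Int) ∣ a * k - 1 := dvd_trans (Int.gcd_dvd_right a m) hmdvd
      have h2d : (Int.gcd a m : Int) ∣ a * k := Dvd.dvd.mul_right (Int.gcd_dvd_left a m) k
      have hdvd : (Int.gcd a m : Int) ∣ 1 := by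
        have hsub := dvd_sub h2d h1d
        simpa using hsub
      have hdn : Int.gcd a m ∣ 1 := by exact_mod_cast hdvd
      exact absurd (Nat.dvd_one.mp hdn) hgne

-- stepping the reduced Fibonacci pair
theorem pvFc_step (m : Int) (hm : 0 < m) (k : Nat) (fp fc : Int)
    (hfp : PySem.Int.mod fp m = PySem.Int.mod ((Nat.fib (k + 1) : Int)) m)
    (hfc : PySem.Int.mod fc m = PySem.Int.mod ((Nat.fib (k + 2) : Int)) m) :
    PySem.Int.mod (PySem.Int.mod (fp + fc) m) m = PySem.Int.mod ((Nat.fib (k + 3) : Int)) m := by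
  simp only [PySem.Int.mod_eq_emod_of_pos hm] at *
  rw [Int.emod_emod_of_dvd _ dvd_rfl, Int.add_emod, hfp, hfc, ← Int.add_emod]
  congr 1
  have f1 : Nat.fib (k + 3) = Nat.fib (k + 1) + Nat.fib (k + 2) := Nat.fib_add_two
  push_cast [f1]
  ring

-- the value B appends to the b-sequence is the i-th b-key
theorem pvBval (m b1 b2 : Int) (hm : 0 < m) (k : Nat) (fp fc : Int)
    (hfp : PySem.Int.mod fp m = PySem.Int.mod ((Nat.fib (k + 1) : Int)) m)
    (hfc : PySem.Int.mod fc m = PySem.Int.mod ((Nat.fib (k + 2) : Int)) m) :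
    PySem.Int.mod (fp * b1 + fc * b2) m = pvL m b1 b2 (k + 2) := by
  rw [pvL_fib m b1 b2 hm k]
  simp only [PySem.Int.mod_eq_emod_of_pos hm] at *
  exact pvModCombCongr m fp fc _ _ b1 b2 hfp hfc

-- the fused loop agrees with A's decryption loop and ends with the full key lists
theorem pvDecLoopB_eq (alpha : List Char) (m a1 a2 b1 b2 : Int) (n : Nat)
    (hm : 3 ≤ n → 0 < m) :
    ∀ (cs : List Char) (i : Nat) (fp fc : Int) (acc : List Char),
      i + cs.length = n →
      PySem.Int.mod fp m = PySem.Int.mod ((Nat.fib (max 2 i - 1) : Int)) m →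
      PySem.Int.mod fc m = PySem.Int.mod ((Nat.fib (max 2 i) : Int)) m →
      ((pvDecLoopB alpha (pvPosDictB alpha) m b1 b2 cs i (pvKs m a1 a2 (max 2 i)) (pvLs m b1 b2 (max 2 i)) fp fc acc).1
          = pvDecLoopA alpha m (pvKs m a1 a2 (max 2 n)) (pvLs m b1 b2 (max 2 n)) cs i acc) ∧
      (∀ v, pvDecLoopA alpha m (pvKs m a1 a2 (max 2 n)) (pvLs m b1 b2 (max 2 n)) cs i acc = some v →
        pvDecLoopB alpha (pvPosDictB alpha) m b1 b2 cs i (pvKs m a1 a2 (max 2 i)) (pvLs m b1 b2 (max 2 i)) fp fc acc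
          = (some v, pvKs m a1 a2 (max 2 n), pvLs m b1 b2 (max 2 n))) := by
  intro cs
  induction cs with
  | nil =>
      intro i fp fc acc hn _ _
      have hi : i = n := by simpa using hn
      subst hi
      refine ⟨by simp [pvDecLoopA, pvDecLoopB], ?_⟩
      intro v hv
      simp only [pvDecLoopA] at hv
      simp [pvDecLoopB, ← Option.some_inj.mp hv]
  | cons c rest ih =>
      intro i fp fc acc hn hfp hfc
      have hin : i < n := by simp at hn; omega
      have hn' : (i + 1) + rest.length = n := by simp at hn ⊢; omega
      by_cases h2 : 2 ≤ i
      · -- key-extension iteration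
        have hm0 : 0 < m := hm (by omega)
        obtain ⟨k, rfl⟩ : ∃ k, i = k + 2 := ⟨i - 2, by omega⟩
        have hmx : max 2 (k + 2) = k + 2 := by omega
        have hmx1 : max 2 (k + 3) = k + 3 := by omega
        rw [hmx] at hfp hfc
        rw [show k + 2 - 1 = k + 1 by omega] at hfp
        have hks := pvKs_stepB m a1 a2 (k + 2)
        rw [if_pos h2] at hks
        have hval := pvBval m b1 b2 hm0 k fp fc hfp hfc
        rw [pvDecLoopA, pvDecLoopB, pvPosDictB_get?]
        have h2' : (2 ≤ k + 2) = True := eq_true h2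
        simp only [h2', if_true]
        rw [hks, hval, hmx, ← pvLs_succ, show k + 2 + 1 = k + 3 from rfl, hmx1]
        have hfp2 : PySem.Int.mod fc m = PySem.Int.mod ((Nat.fib (max 2 (k + 3) - 1) : Int)) m := by
          rw [show max 2 (k + 3) - 1 = k + 2 by omega]; exact hfc
        have hfc2 : PySem.Int.mod (PySem.Int.mod (fp + fc) m) m
            = PySem.Int.mod ((Nat.fib (max 2 (k + 3)) : Int)) m := by
          rw [hmx1]; exact pvFc_step m hm0 k fp fc hfp hfc
        cases hidx : PySem.List.index? alpha c with
        | none =>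
            have hmem : c ∉ alpha := (PySem.List.index?_eq_none_iff _ _).mp hidx
            have hcont : alpha.contains c = false := by simpa using hmem
            simp only [hcont, Bool.false_eq_true, if_false, Option.map]
            have := ih (k + 3) fc (PySem.Int.mod (fp + fc) m) (acc ++ [c]) hn' hfp2 hfc2
            rw [hmx1] at this
            exact this
        | some y =>
            have hmem : c ∈ alpha := by
              have hs : (PySem.List.index? alpha c).isSome := by rw [hidx]; rfl
              exact (PySem.List.index?_isSome_iff _ _).mp hs
            have hcont : alpha.contains c = true := by simpa using hmem
            have hgB : (pvKs m a1 a2 (k + 3)).getD (k + 2) 0 = pvK m a1 a2 (k + 2) :=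
              pvKs_getD m a1 a2 (by omega)
            have hgA : (pvKs m a1 a2 (max 2 n)).getD (k + 2) 0 = pvK m a1 a2 (k + 2) :=
              pvKs_getD m a1 a2 (by omega)
            have hlB : (pvLs m b1 b2 (k + 3)).getD (k + 2) 0 = pvL m b1 b2 (k + 2) :=
              pvLs_getD m b1 b2 (by omega)
            have hlA : (pvLs m b1 b2 (max 2 n)).getD (k + 2) 0 = pvL m b1 b2 (k + 2) :=
              pvLs_getD m b1 b2 (by omega)
            simp only [hcont, if_true, Option.map, Option.getD, hgA, hgB, hlA, hlB,
              pvInverse_eq]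
            cases hri : pvModInverse (pvK m a1 a2 (k + 2)) m with
            | none => simp
            | some inv =>
                simp only []
                have := ih (k + 3) fc (PySem.Int.mod (fp + fc) m)
                  (acc ++ [PySem.List.pyGetD alpha
                    (PySem.Int.mod (inv * ((y : Int) - pvL m b1 b2 (k + 2))) m) ' '])
                  hn' hfp2 hfc2
                rw [hmx1] at this
                exact this
      · -- no key extension yet (i < 2)
        have hmx : max 2 i = 2 := by omega
        have hmq : max 2 (i + 1) = max 2 i := by omega
        rw [pvDecLoopA, pvDecLoopB, pvPosDictB_get?]
        have h2' : (2 ≤ i) = False := eq_false h2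
        simp only [h2', if_false]
        have hfp2 : PySem.Int.mod fp m = PySem.Int.mod ((Nat.fib (max 2 (i + 1) - 1) : Int)) m := by
          rw [hmq]; exact hfp
        have hfc2 : PySem.Int.mod fc m = PySem.Int.mod ((Nat.fib (max 2 (i + 1)) : Int)) m := by
          rw [hmq]; exact hfc
        cases hidx : PySem.List.index? alpha c with
        | none =>
            have hmem : c ∉ alpha := (PySem.List.index?_eq_none_iff _ _).mp hidx
            have hcont : alpha.contains c = false := by simpa using hmem
            simp only [hcont, Bool.false_eq_true, if_false, Option.map]
            have := ih (i + 1) fp fc (acc ++ [c]) hn' hfp2 hfc2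
            rw [hmq] at this
            exact this
        | some y =>
            have hmem : c ∈ alpha := by
              have hs : (PySem.List.index? alpha c).isSome := by rw [hidx]; rfl
              exact (PySem.List.index?_isSome_iff _ _).mp hs
            have hcont : alpha.contains c = true := by simpa using hmem
            have hgB : (pvKs m a1 a2 (max 2 i)).getD i 0 = pvK m a1 a2 i :=
              pvKs_getD m a1 a2 (by omega)
            have hgA : (pvKs m a1 a2 (max 2 n)).getD i 0 = pvK m a1 a2 i :=
              pvKs_getD m a1 a2 (by omega)
            have hlB : (pvLs m b1 b2 (max 2 i)).getD i 0 = pvL m b1 b2 i :=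
              pvLs_getD m b1 b2 (by omega)
            have hlA : (pvLs m b1 b2 (max 2 n)).getD i 0 = pvL m b1 b2 i :=
              pvLs_getD m b1 b2 (by omega)
            simp only [hcont, if_true, Option.map, Option.getD, hgA, hgB, hlA, hlB,
              pvInverse_eq]
            cases hri : pvModInverse (pvK m a1 a2 i) m with
            | none => simp
            | some inv =>
                simp only []
                have := ih (i + 1) fp fc
                  (acc ++ [PySem.List.pyGetD alpha
                    (PySem.Int.mod (inv * ((y : Int) - pvL m b1 b2 i)) m) ' '])
                  hn' hfp2 hfc2
                rw [hmq] at this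
                exact this

-- ===== VERDICT (by name: the statement is the Claim_ definition above) =====
theorem affine_recursive_decrypt_spec : Claim_equal_affine_recursive_decrypt := by
  intro text a1 a2 b1 b2 alphabet _ hpre
  unfold Spec_affine_recursive_decrypt
  simp only [affine_recursive_decrypt, affine_recursive_decrypt_alt]
  have hkey : pvKeyLoopA (PySem.Str.len alphabet) (text.toList.length - 2) ([a1, a2], [b1, b2])
      = (pvKs (PySem.Str.len alphabet) a1 a2 (max 2 text.toList.length),
         pvLs (PySem.Str.len alphabet) b1 b2 (max 2 text.toList.length)) := by
    rw [← pvKs_two (PySem.Str.len alphabet) a1 a2, ← pvLs_two (PySem.Str.len alphabet) b1 b2,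
      pvKeyLoopA_eq _ a1 a2 b1 b2 (text.toList.length - 2) 2 le_rfl]
    have h22 : 2 + (text.toList.length - 2) = max 2 text.toList.length := by omega
    rw [h22]
  have hm : 3 ≤ text.toList.length → 0 < PySem.Str.len alphabet := by
    intro h3
    unfold Pre_affine_recursive_decrypt at hpre
    have hlt : (text.toList.length : Int) = PySem.Str.len text := by
      simp [PySem.Str.len_eq]
    have hnn : 0 ≤ PySem.Str.len alphabet := by
      rw [PySem.Str.len_eq]; positivity
    rcases lt_or_eq_of_le hnn with h | h
    · exact h
    · exact absurd ⟨h.symm, by omega⟩ hpre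
  have hmain := pvDecLoopB_eq alphabet.toList (PySem.Str.len alphabet) a1 a2 b1 b2
      text.toList.length hm text.toList 0 1 1 [] (by omega) (by norm_num) (by norm_num)
  have h20 : max 2 0 = 2 := rfl
  rw [h20, pvKs_two, pvLs_two] at hmain
  obtain ⟨h1, hsome⟩ := hmain
  rw [hkey]
  cases hA : pvDecLoopA alphabet.toList (PySem.Str.len alphabet)
      (pvKs (PySem.Str.len alphabet) a1 a2 (max 2 text.toList.length))
      (pvLs (PySem.Str.len alphabet) b1 b2 (max 2 text.toList.length)) text.toList 0 [] with
  | none =>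
      rw [hA] at h1
      rw [h1]
  | some v =>
      rw [hsome v hA]
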